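-- pv_equiv track=rewrite | github.com/tianwenqi/ClinicalPathway | MNK.py | get_representative_sequence
-- ===== SOURCE A (Python) =====
-- from collections import Counter
--
-- def get_representative_sequence(cluster_seqs):
--     """从路径中找出最常见的“近似路径”"""
--     # 方法：按位置取最多label，如果长度不同则补空
--     max_len = max(len(seq) for seq in cluster_seqs)
--     padded_seqs = [seq + [''] * (max_len - len(seq)) for seq in cluster_seqs]
--     representative = []
--     for pos in range(max_len):
--         items = [seq[pos] for seq in padded_seqs if seq[pos] != '']
--         if items:
--             representative.append(Counter(items).most_common(1)[0][0])
--     return representative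
-- ===== SOURCE B (Python) =====
-- from collections import Counter
--
-- def get_representative_sequence(cluster_seqs):
--     """Per-position most-common label, built in one row-major pass (no padding)."""
--     max_len = max((len(seq) for seq in cluster_seqs), default=0)
--     counters = [Counter() for _ in range(max_len)]
--     for seq in cluster_seqs:
--         for i, label in enumerate(seq):
--             if label != '':
--                 counters[i][label] += 1
--     return [c.most_common(1)[0][0] for c in counters if c]
-- ===== Notes on version B (the rewrite author's own statement) =====
-- stated objective: alternative
-- what changed: B drops the padding and the per-position column comprehension: it makes a single row-major pass that increments one Counter per position, then reads each non-empty Counter's most_common(1) in order.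
import Mathlib
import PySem

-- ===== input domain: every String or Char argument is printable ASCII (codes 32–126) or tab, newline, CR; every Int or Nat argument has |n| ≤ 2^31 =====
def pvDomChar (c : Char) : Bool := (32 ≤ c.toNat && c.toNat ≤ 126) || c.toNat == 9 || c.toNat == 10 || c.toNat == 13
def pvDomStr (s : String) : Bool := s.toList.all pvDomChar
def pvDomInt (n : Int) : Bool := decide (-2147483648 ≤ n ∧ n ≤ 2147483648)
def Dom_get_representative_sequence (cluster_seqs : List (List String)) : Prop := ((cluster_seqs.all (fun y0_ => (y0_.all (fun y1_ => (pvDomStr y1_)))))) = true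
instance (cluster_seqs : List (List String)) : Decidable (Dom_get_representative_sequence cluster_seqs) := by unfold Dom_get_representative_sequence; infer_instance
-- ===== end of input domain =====

-- B replaces A's padding + per-position column comprehension by a single row-major pass
-- that increments one Counter per position (objective: alternative, same asymptotic cost).

-- Counter(xs).most_common(1)[0][0]: first key (in first-insertion order) with maximal count.
-- Shared library helper: both Pythons call collections.Counter.most_common(1). The "" default
-- is unreachable: both programs only call it on a non-empty Counter.
def pvMostCommon1 (d : PySem.Dict String Int) : String :=
  match d.items with
  | [] => ""
  | p :: ps => (ps.foldl (fun best q => if best.2 < q.2 then q else best) p).1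

-- ===== PORT A =====
def get_representative_sequence (cluster_seqs : List (List String)) : List String :=
  match PySem.List.max? (cluster_seqs.map List.length) (fun x => x) with
  | none => []   -- Python: max() raises ValueError here; excluded by Pre_
  | some maxLen =>
    let padded := cluster_seqs.map (fun seq => seq ++ List.replicate (maxLen - seq.length) "")
    (PySem.List.pyRange 0 (maxLen : Int)).foldl (fun rep pos =>
      let items := padded.filterMap (fun seq =>
        match PySem.List.pyGet? seq pos with
        | some x => if x ≠ "" then some x else none
        | none => none)
      if items ≠ [] then rep ++ [pvMostCommon1 (PySem.Dict.counter items)] else rep) []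

-- ===== PORT B =====
def get_representative_sequence_alt (cluster_seqs : List (List String)) : List String :=
  let maxLen := PySem.List.maxD (cluster_seqs.map List.length) (fun x => x) 0
  let counters := cluster_seqs.foldl (fun ctrs seq =>
      (PySem.List.enumerate seq).foldl (fun cs2 p =>
        if p.2 ≠ "" then cs2.modify p.1.toNat (fun d => d.modify p.2 0 (· + 1)) else cs2) ctrs)
    (List.replicate maxLen PySem.Dict.empty)
  counters.foldl (fun rep c => if c.items ≠ [] then rep ++ [pvMostCommon1 c] else rep) []

-- ===== PRECONDITION & SPEC =====
-- Pre_ excludes only the empty list, on which A raises ValueError (max() of an empty sequence).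
def Pre_get_representative_sequence (cluster_seqs : List (List String)) : Prop := cluster_seqs ≠ []
instance (cluster_seqs : List (List String)) : Decidable (Pre_get_representative_sequence cluster_seqs) := by unfold Pre_get_representative_sequence; infer_instance
def pvWitness_get_representative_sequence : List (List String) := [["a", "b"], ["a"]]

def Spec_get_representative_sequence (cluster_seqs : List (List String)) (out : List String) : Prop := out = get_representative_sequence_alt cluster_seqs
instance (cluster_seqs : List (List String)) (out : List String) : Decidable (Spec_get_representative_sequence cluster_seqs out) := by unfold Spec_get_representative_sequence; infer_instance

-- ===== CLAIM (what is proved, stated in full; the proofs are below) =====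
def Claim_equal_get_representative_sequence : Prop := ∀ (cluster_seqs : List (List String)), Dom_get_representative_sequence cluster_seqs → Pre_get_representative_sequence cluster_seqs → Spec_get_representative_sequence cluster_seqs (get_representative_sequence cluster_seqs)
-- ===== LEMMAS AND PROOFS =====

-- the labels of column j, in row order, empty labels dropped
def pvColItems (cs : List (List String)) (j : Nat) : List String :=
  cs.filterMap (fun s => match s[j]? with
    | some x => if x ≠ "" then some x else none
    | none => none)

def pvStep (d : PySem.Dict String Int) (x : String) : PySem.Dict String Int := d.modify x 0 (· + 1)

def pvApply (seq : List String) (j : Nat) (d : PySem.Dict String Int) : PySem.Dict String Int :=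
  match seq[j]? with
  | some x => if x ≠ "" then pvStep d x else d
  | none => d

lemma pv_row_getElem? (seq : List String) (k : Nat)
    (ctrs : List (PySem.Dict String Int)) (j : Nat) :
    ((PySem.List.enumerate seq (k : Int)).foldl (fun cs2 p =>
        if p.2 ≠ "" then cs2.modify p.1.toNat (fun d => d.modify p.2 0 (· + 1)) else cs2) ctrs)[j]? =
      if k ≤ j then (ctrs[j]?).map (pvApply seq (j - k)) else ctrs[j]? := by
  induction seq generalizing k ctrs with
  | nil =>
    simp only [PySem.List.enumerate, List.foldl_nil]
    split
    · cases ctrs[j]? <;> simp [pvApply]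
    · rfl
  | cons x xs ih =>
    rw [PySem.List.enumerate_cons]
    simp only [List.foldl_cons]
    have hc : ((k : Int) + 1) = ((k + 1 : Nat) : Int) := by push_cast; ring
    rw [hc, ih]
    rcases Nat.lt_trichotomy j k with hlt | heq | hgt
    · have h1 : ¬ (k + 1 ≤ j) := by omega
      have h2 : ¬ (k ≤ j) := by omega
      simp only [if_neg h1, if_neg h2]
      split
      · rw [List.getElem?_modify]
        have hk : ¬ (k = j) := by omega
        cases ctrs[j]? <;> simp [hk]
      · rfl
    · subst heq
      have h1 : ¬ (j + 1 ≤ j) := by omega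
      simp only [if_neg h1, le_refl, if_pos, Nat.sub_self]
      by_cases h : x ≠ ""
      · rw [if_pos h, List.getElem?_modify]
        have he : (j : Int).toNat = j := by omega
        cases ctrs[j]? <;> simp [he, pvApply, pvStep, h]
      · rw [if_neg h]
        simp only [ne_eq, not_not] at h
        cases ctrs[j]? <;> simp [pvApply, h]
    · have h1 : k + 1 ≤ j := by omega
      have h2 : k ≤ j := by omega
      simp only [if_pos h1, if_pos h2]
      have hApp : pvApply xs (j - (k + 1)) = pvApply (x :: xs) (j - k) := by
        funext d
        have : j - k = (j - (k+1)) + 1 := by omega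
        simp [pvApply, this]
      rw [hApp]
      split
      · rw [List.getElem?_modify]
        have hk : ¬ (k = j) := by omega
        cases ctrs[j]? <;> simp [hk]
      · rfl

lemma pv_pass_getElem? (cs : List (List String))
    (ctrs : List (PySem.Dict String Int)) (j : Nat) :
    (cs.foldl (fun ctrs seq =>
        (PySem.List.enumerate seq).foldl (fun cs2 p =>
          if p.2 ≠ "" then cs2.modify p.1.toNat (fun d => d.modify p.2 0 (· + 1)) else cs2) ctrs) ctrs)[j]? =
      (ctrs[j]?).map (fun d => (pvColItems cs j).foldl pvStep d) := by
  induction cs generalizing ctrs with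
  | nil =>
    simp only [List.foldl_nil, pvColItems, List.filterMap_nil]
    cases ctrs[j]? <;> simp
  | cons seq rest ih =>
    simp only [List.foldl_cons]
    rw [ih]
    have h0 : PySem.List.enumerate seq = PySem.List.enumerate seq ((0 : Nat) : Int) := by norm_num
    rw [h0, pv_row_getElem? seq 0 ctrs j]
    simp only [Nat.zero_le, if_pos, Nat.sub_zero]
    have hcol : pvColItems (seq :: rest) j =
        (match seq[j]? with | some x => if x ≠ "" then some x else none | none => none).toList
          ++ pvColItems rest j := by
      simp only [pvColItems, List.filterMap_cons]
      split <;> simp_all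
    rw [hcol]
    cases hc : ctrs[j]? with
    | none => simp
    | some d =>
      simp only [Option.map_some, List.foldl_append]
      congr 1
      cases hs : seq[j]? with
      | none => simp [pvApply, hs]
      | some x =>
        by_cases hx : x ≠ "" <;> simp [pvApply, hs, hx]

lemma pv_counter_items_ne_nil (xs : List String) (h : xs ≠ []) :
    (PySem.Dict.counter xs).items ≠ [] := by
  rw [PySem.Dict.items_counter]
  cases xs with
  | nil => exact absurd rfl h
  | cons y ys =>
    intro hmap
    have : y ∈ PySem.Set.ofList (y :: ys) := by
      rw [PySem.Set.mem_ofList]; exact List.mem_cons_self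
    rw [List.map_eq_nil_iff.mp hmap] at this
    exact absurd this (List.not_mem_nil)

lemma pv_items_eq (cs : List (List String)) (maxLen : Nat)
    (hb : ∀ s ∈ cs, s.length ≤ maxLen) (j : Nat) (hj : j < maxLen) :
    (cs.map (fun seq => seq ++ List.replicate (maxLen - seq.length) "")).filterMap (fun seq =>
        match PySem.List.pyGet? seq ((j : Nat) : Int) with
        | some x => if x ≠ "" then some x else none
        | none => none) = pvColItems cs j := by
  rw [List.filterMap_map, pvColItems]
  apply List.filterMap_congr
  intro s hs
  have hsl : s.length ≤ maxLen := hb s hs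
  have hlen : (s ++ List.replicate (maxLen - s.length) "").length = maxLen := by
    simp [List.length_append]
    omega
  have hget := PySem.List.pyGet?_natCast (s ++ List.replicate (maxLen - s.length) "") j
  simp only [Function.comp_apply, hget]
  by_cases hjs : j < s.length
  · rw [List.getElem?_append_left hjs]
  · rw [List.getElem?_append_right (by omega)]
    rw [List.getElem?_replicate]
    have : j - s.length < maxLen - s.length := by omega
    rw [if_pos this]
    have : s[j]? = none := by rw [List.getElem?_eq_none_iff]; omega
    rw [this]
    simp


-- ===== VERDICT (by name: the statement is the Claim_ definition above) =====
theorem get_representative_sequence_spec : Claim_equal_get_representative_sequence := by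
  intro cs _ hpre
  unfold Spec_get_representative_sequence
  unfold get_representative_sequence get_representative_sequence_alt
  cases hmax : PySem.List.max? (cs.map List.length) (fun x => x) with
  | none =>
    rw [PySem.List.max?_eq_none_iff] at hmax
    exact absurd (List.map_eq_nil_iff.mp hmax) hpre
  | some m =>
    dsimp only
    have hb : ∀ s ∈ cs, s.length ≤ m := by
      intro s hs
      exact PySem.List.max?_isMax hmax s.length (List.mem_map_of_mem hs)
    -- B's maxLen is A's
    have hmaxD : PySem.List.maxD (cs.map List.length) (fun x => x) 0 = m := by
      simp [PySem.List.maxD, hmax]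
    rw [hmaxD]
    -- B's counters list, characterised per position
    have hcounters : cs.foldl (fun ctrs seq =>
        (PySem.List.enumerate seq).foldl (fun cs2 p =>
          if p.2 ≠ "" then cs2.modify p.1.toNat (fun d => d.modify p.2 0 (· + 1)) else cs2) ctrs)
        (List.replicate m PySem.Dict.empty)
        = (List.range m).map (fun j => PySem.Dict.counter (pvColItems cs j)) := by
      apply List.ext_getElem?
      intro j
      rw [pv_pass_getElem?, List.getElem?_replicate, List.getElem?_map]
      by_cases hj : j < m
      · rw [if_pos hj, List.getElem?_range hj]
        rfl
      · rw [if_neg hj]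
        have : (List.range m)[j]? = none := by
          rw [List.getElem?_eq_none_iff]; simpa using Nat.le_of_not_lt hj
        rw [this]
        rfl
    rw [hcounters, List.foldl_map]
    -- A's range loop over the same positions
    rw [PySem.List.pyRange_zero_natCast, List.foldl_map]
    apply PySem.List.foldl_congr_mem
    intro acc j hjmem
    have hj : j < m := List.mem_range.mp hjmem
    rw [pv_items_eq cs m hb j hj]
    by_cases hne : pvColItems cs j = []
    · rw [hne]
      simp [PySem.Dict.counter, PySem.Dict.empty]
    · rw [if_pos hne, if_pos (pv_counter_items_ne_nil _ hne)]
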